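-- pv_equiv track=rewrite | github.com/demetribic/AI-Midi-Helper | src/run_midi_generation/post_process.py | get_scale_pitches
-- ===== SOURCE A (Python) =====
-- def get_scale_pitches(tonic, mode):
--     major_intervals = [0, 2, 4, 5, 7, 9, 11]
--     minor_intervals = [0, 2, 3, 5, 7, 8, 10]
--     note_to_pc = {
--         'C': 0,
--         'C#': 1, 'Db': 1,
--         'D': 2,
--         'D#': 3, 'Eb': 3,
--         'E': 4, 'Fb': 4,
--         'F': 5, 'E#': 5,
--         'F#': 6, 'Gb': 6,
--         'G': 7,
--         'G#': 8, 'Ab': 8,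
--         'A': 9,
--         'A#': 10, 'Bb': 10,
--         'B': 11, 'Cb': 11, 'B#': 0
--     }
--     if tonic not in note_to_pc:
--         raise ValueError(f"Invalid tonic note: {tonic}")
--
--     tonic_pc = note_to_pc[tonic]
--     intervals = major_intervals if mode == 'major' else minor_intervals
--     scale_pcs = [(tonic_pc + i) % 12 for i in intervals]
--
--     scale_pitches = set()
--     for octave in range(11):  # 0..10
--         for pc in scale_pcs:
--             pitch = octave * 12 + pc
--             if 0 <= pitch <= 127:
--                 scale_pitches.add(pitch)
--     return scale_pitches
-- ===== SOURCE B (Python) =====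
-- def get_scale_pitches(tonic, mode):
--     major_intervals = [0, 2, 4, 5, 7, 9, 11]
--     minor_intervals = [0, 2, 3, 5, 7, 8, 10]
--     note_to_pc = {
--         'C': 0,
--         'C#': 1, 'Db': 1,
--         'D': 2,
--         'D#': 3, 'Eb': 3,
--         'E': 4, 'Fb': 4,
--         'F': 5, 'E#': 5,
--         'F#': 6, 'Gb': 6,
--         'G': 7,
--         'G#': 8, 'Ab': 8,
--         'A': 9,
--         'A#': 10, 'Bb': 10,
--         'B': 11, 'Cb': 11, 'B#': 0
--     }
--     if tonic not in note_to_pc: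
--         raise ValueError(f"Invalid tonic note: {tonic}")
--
--     tonic_pc = note_to_pc[tonic]
--     intervals = major_intervals if mode == 'major' else minor_intervals
--     scale_pcs = [(tonic_pc + i) % 12 for i in intervals]
--
--     # Repeatedly transpose the scale up an octave until it leaves the MIDI range.
--     pitches = []
--     layer = scale_pcs
--     while layer:
--         pitches.extend(layer)
--         layer = [p + 12 for p in layer if p + 12 <= 127]
--     return set(pitches)
-- ===== Notes on version B (the rewrite author's own statement) =====
-- stated objective: alternative
-- what changed: Replaced A's indexed nested loops over range(11) octaves with a per-pitch 0<=p<=127 check and incremental set.add by a worklist that repeatedly transposes the whole scale layer up an octave (p+12) until it leaves the MIDI range, with no octave counter, multiplication or lower-bound check; Pre_ excludes tonics outside the note table, on which A raises ValueError (B raises too).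
import Mathlib
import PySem

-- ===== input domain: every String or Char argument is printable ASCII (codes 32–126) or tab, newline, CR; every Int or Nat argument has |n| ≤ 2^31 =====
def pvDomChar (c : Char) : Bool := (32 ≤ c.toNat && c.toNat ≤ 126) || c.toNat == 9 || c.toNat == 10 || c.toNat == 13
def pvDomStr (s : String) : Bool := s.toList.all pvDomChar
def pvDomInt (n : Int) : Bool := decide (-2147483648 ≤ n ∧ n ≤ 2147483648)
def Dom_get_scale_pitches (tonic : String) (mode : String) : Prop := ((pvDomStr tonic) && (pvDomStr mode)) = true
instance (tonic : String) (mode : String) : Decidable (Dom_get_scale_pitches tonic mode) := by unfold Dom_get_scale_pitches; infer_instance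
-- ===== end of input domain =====

-- B replaces A's indexed nested octave loops and per-pitch bound check by repeatedly
-- transposing the scale up an octave until it leaves the MIDI range (objective: alternative).

-- ===== PORT A =====
def noteToPc : PySem.Dict String Int :=
  PySem.Dict.ofList [("C",0),("C#",1),("Db",1),("D",2),("D#",3),("Eb",3),("E",4),("Fb",4),("F",5),("E#",5),
   ("F#",6),("Gb",6),("G",7),("G#",8),("Ab",8),("A",9),("A#",10),("Bb",10),("B",11),("Cb",11),("B#",0)]

def majorIntervals : List Int := [0, 2, 4, 5, 7, 9, 11]
def minorIntervals : List Int := [0, 2, 3, 5, 7, 8, 10]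

-- the nested 'for octave in range(11): for pc in scale_pcs: …' loop of A
def buildA (scale_pcs : List Int) : List Int :=
  (PySem.List.pyRange 0 11 1).foldl (fun s octave =>
    scale_pcs.foldl (fun s pc =>
      let pitch := octave * 12 + pc
      if 0 ≤ pitch ∧ pitch ≤ 127 then PySem.Set.add s pitch else s) s) PySem.Set.empty

def get_scale_pitches (tonic : String) (mode : String) : List Int :=
  match PySem.Dict.get? noteToPc tonic with
  | none => []   -- Python raises ValueError here; excluded by Pre_
  | some tonic_pc =>
    let intervals := if mode == "major" then majorIntervals else minorIntervals
    buildA (intervals.map (fun i => PySem.Int.mod (tonic_pc + i) 12))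

-- ===== PORT B =====
-- the 'while layer: pitches.extend(layer); layer = [p+12 for p in layer if p+12<=127]' loop;
-- the fuel argument only makes the recursion total: 12 iterations always suffice here
def layersB (fuel : Nat) (layer : List Int) (pitches : List Int) : List Int :=
  match fuel with
  | 0 => pitches
  | n + 1 =>
    if layer.isEmpty then pitches
    else layersB n (layer.filterMap (fun p => if p + 12 ≤ 127 then some (p + 12) else none))
         (pitches ++ layer)

def get_scale_pitches_alt (tonic : String) (mode : String) : List Int :=
  match PySem.Dict.get? noteToPc tonic with
  | none => []   -- Python raises ValueError here; excluded by Pre_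
  | some tonic_pc =>
    let intervals := if mode == "major" then majorIntervals else minorIntervals
    PySem.Set.ofList (layersB 12 (intervals.map (fun i => PySem.Int.mod (tonic_pc + i) 12)) [])

-- ===== PRECONDITION & SPEC =====
-- Pre_ excludes exactly the tonics outside the note table, on which the Python A raises ValueError.
def Pre_get_scale_pitches (tonic : String) (mode : String) : Prop :=
  tonic ∈ PySem.Dict.keys noteToPc
instance (tonic : String) (mode : String) : Decidable (Pre_get_scale_pitches tonic mode) := by
  unfold Pre_get_scale_pitches; infer_instance

def pvWitness_get_scale_pitches : String × String := ("C", "major")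

def Spec_get_scale_pitches (tonic : String) (mode : String) (out : List Int) : Prop := out = get_scale_pitches_alt tonic mode
instance (tonic : String) (mode : String) (out : List Int) : Decidable (Spec_get_scale_pitches tonic mode out) := by unfold Spec_get_scale_pitches; infer_instance

-- ===== CLAIM =====
def Claim_equal_get_scale_pitches : Prop := ∀ (tonic : String) (mode : String), Dom_get_scale_pitches tonic mode → Pre_get_scale_pitches tonic mode → Spec_get_scale_pitches tonic mode (get_scale_pitches tonic mode)

-- ===== LEMMAS AND PROOFS =====

set_option maxHeartbeats 4000000 in
set_option maxRecDepth 10000 in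
lemma buildA_eq_buildB : ∀ pc ∈ ([0,1,2,3,4,5,6,7,8,9,10,11] : List Int),
    ∀ iv ∈ [majorIntervals, minorIntervals],
    buildA (iv.map (fun i => PySem.Int.mod (pc + i) 12)) =
      PySem.Set.ofList (layersB 12 (iv.map (fun i => PySem.Int.mod (pc + i) 12)) []) := by
  decide

lemma noteToPc_eq : noteToPc = PySem.Dict.mk
    [("C",0),("C#",1),("Db",1),("D",2),("D#",3),("Eb",3),("E",4),("Fb",4),("F",5),("E#",5),
     ("F#",6),("Gb",6),("G",7),("G#",8),("Ab",8),("A",9),("A#",10),("Bb",10),("B",11),("Cb",11),("B#",0)] := by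
  decide

lemma pc_mem : ∀ tonic pc, PySem.Dict.get? noteToPc tonic = some pc →
    pc ∈ ([0,1,2,3,4,5,6,7,8,9,10,11] : List Int) := by
  intro tonic pc h
  have hk : tonic ∈ PySem.Dict.keys noteToPc := by
    by_contra hn
    rw [(PySem.Dict.get?_eq_none_iff_not_mem_keys noteToPc tonic).mpr hn] at h
    simp at h
  rw [noteToPc_eq] at h
  fin_cases hk <;> simp_all [PySem.Dict.get?_mk_cons]

-- ===== VERDICT =====
theorem get_scale_pitches_spec : Claim_equal_get_scale_pitches := by
  intro tonic mode _ hpre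
  unfold Spec_get_scale_pitches get_scale_pitches get_scale_pitches_alt
  cases hget : PySem.Dict.get? noteToPc tonic with
  | none =>
    exact absurd hpre ((PySem.Dict.get?_eq_none_iff_not_mem_keys noteToPc tonic).mp hget)
  | some pc =>
    have hpc := pc_mem tonic pc hget
    simp only
    cases hmaj : mode == "major" <;> simp only [hmaj, Bool.false_eq_true, if_true, if_false] <;>
      exact buildA_eq_buildB pc hpc _ (by simp)
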